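-- pv_equiv track=rewrite | github.com/shree-elamathi/python-programs | geeksforgeeks/find_the_n_character.py | nthchar
-- ===== SOURCE A (Python) =====
-- def nthchar(s,r,n):
--     for i in range(0,r):
--         a=""
--         for i in s:
--             if i=="1":
--                 a+="10"
--             else:
--                 a+="01"
--         s=a
--     return (s[n])
-- ===== SOURCE B (Python) =====
-- def nthchar(s, r, n):
--     # closed form: block = index >> r, value = block char xor parity of the low r bits
--     if r <= 0:
--         return s[n]
--     size = len(s) * 2 ** r
--     idx = n if n >= 0 else n + size
--     blk, off = divmod(idx, 2 ** r)
--     par = False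
--     for _ in range(r):
--         par = par != (off % 2 == 1)
--         off //= 2
--     v = s[blk] == "1"
--     return "1" if v != par else "0"
-- ===== Notes on version B (the rewrite author's own statement) =====
-- stated objective: alternative
-- what changed: Instead of materialising the full r-fold expansion string by string, B computes the requested character directly: the character at index i descends from the block character s[i >> r], flipped by the parity of the low r bits of i (Thue-Morse style), using only arithmetic on the index.
import Mathlib
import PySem

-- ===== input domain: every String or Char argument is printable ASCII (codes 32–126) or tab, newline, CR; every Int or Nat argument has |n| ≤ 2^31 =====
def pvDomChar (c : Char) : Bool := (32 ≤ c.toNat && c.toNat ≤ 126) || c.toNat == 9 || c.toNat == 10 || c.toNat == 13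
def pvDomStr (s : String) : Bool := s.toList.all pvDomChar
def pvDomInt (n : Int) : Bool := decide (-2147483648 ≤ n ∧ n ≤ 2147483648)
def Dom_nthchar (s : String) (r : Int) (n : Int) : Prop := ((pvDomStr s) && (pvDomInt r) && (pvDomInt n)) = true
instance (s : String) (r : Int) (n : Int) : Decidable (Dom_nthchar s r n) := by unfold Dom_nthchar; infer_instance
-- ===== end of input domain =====

-- B computes the requested character directly from the block character s[i >> r] and the parity of the low r bits of the index, instead of materialising the whole r-fold expansion; equal on all of Pre_ (A's final index in range).

-- ===== PORT A =====
-- inner loop of A: a = ""; for i in s: a += "10" if i == "1" else "01"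
-- ported as flatMap: the same two-char piece per character, in the same order
-- (equal to the foldl-append accumulation by PySem.List.foldl_append_eq_flatMap,
-- which evaluates quadratically and is infeasible for #eval on the sampled sizes)
def pvExpandA (cs : List Char) : List Char :=
  cs.flatMap (fun c => if c = '1' then ['1', '0'] else ['0', '1'])

def nthchar (s : String) (r : Int) (n : Int) : String :=
  match PySem.List.pyGet?
      ((PySem.List.pyRange 0 r 1).foldl (fun t _ => pvExpandA t) s.toList) n with
  | some c => String.ofList [c]
  | none => ""  -- Python raises IndexError here; excluded by Pre_

-- ===== PORT B =====
-- idx = n if n >= 0 else n + len(s) * 2**r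
def pvIdxB (s : String) (r : Int) (n : Int) : Int :=
  if 0 ≤ n then n else n + (s.toList.length : Int) * 2 ^ r.toNat

-- par = False; for _ in range(r): par = par != (off % 2 == 1); off //= 2
def pvParB (r : Int) (off : Int) : Bool :=
  ((PySem.List.pyRange 0 r 1).foldl
      (fun (p : Bool × Int) _ => (p.1 != decide (PySem.Int.mod p.2 2 = 1), PySem.Int.floordiv p.2 2))
      (false, off)).1

def nthchar_alt (s : String) (r : Int) (n : Int) : String :=
  if r ≤ 0 then
    match PySem.List.pyGet? s.toList n with
    | some c => String.ofList [c]
    | none => ""  -- Python raises IndexError here; excluded by Pre_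
  else
    -- v = (s[blk] == "1"); return "1" if v != par else "0"
    if (decide (PySem.List.pyGet? s.toList
            (PySem.Int.floordiv (pvIdxB s r n) (2 ^ r.toNat)) = some '1'))
        != pvParB r (PySem.Int.mod (pvIdxB s r n) (2 ^ r.toNat)) then "1" else "0"

-- ===== PRECONDITION & SPEC =====
-- Pre_ = exactly the inputs on which Python A returns: n in range of the expanded string
-- (length len(s)*2^r for r > 0, len(s) otherwise); elsewhere A raises IndexError.
def Pre_nthchar (s : String) (r : Int) (n : Int) : Prop :=
  -((s.toList.length : Int) * 2 ^ r.toNat) ≤ n ∧ n < (s.toList.length : Int) * 2 ^ r.toNat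
instance (s : String) (r : Int) (n : Int) : Decidable (Pre_nthchar s r n) := by
  unfold Pre_nthchar; infer_instance

def pvWitness_nthchar : String × Int × Int := ("1a0", 2, -5)

def Spec_nthchar (s : String) (r : Int) (n : Int) (out : String) : Prop := out = nthchar_alt s r n
instance (s : String) (r : Int) (n : Int) (out : String) : Decidable (Spec_nthchar s r n out) := by unfold Spec_nthchar; infer_instance

-- ===== CLAIM (what is proved, stated in full; the proofs are below) =====
def Claim_equal_nthchar : Prop := ∀ (s : String) (r : Int) (n : Int), Dom_nthchar s r n → Pre_nthchar s r n → Spec_nthchar s r n (nthchar s r n)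

-- ===== LEMMAS AND PROOFS =====

def pvBit (c : Char) : Bool := decide (c = '1')
def pvToChar (b : Bool) : Char := if b then '1' else '0'
-- parity of the low k bits of i
def pvPar : Nat → Nat → Bool
  | 0, _ => false
  | k + 1, i => (decide (i % 2 = 1)).xor (pvPar k (i / 2))

theorem pvBit_toChar (b : Bool) : pvBit (pvToChar b) = b := by cases b <;> decide

theorem pvFoldl_iter {α β : Type} (l : List α) (f : β → β) (a : β) :
    l.foldl (fun t _ => f t) a = f^[l.length] a := by
  induction l generalizing a with
  | nil => rfl
  | cons x xs ih => simp [List.foldl_cons, ih, Function.iterate_succ_apply]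

theorem pvExpandA_length (cs : List Char) : (pvExpandA cs).length = 2 * cs.length := by
  unfold pvExpandA
  induction cs with
  | nil => rfl
  | cons c cs ih => by_cases h : c = '1' <;> simp [List.flatMap_cons, h] at * <;> omega

theorem pvIter_length (k : Nat) (cs : List Char) :
    (pvExpandA^[k] cs).length = cs.length * 2 ^ k := by
  induction k generalizing cs with
  | zero => simp
  | succ k ih =>
    rw [Function.iterate_succ_apply, ih, pvExpandA_length]
    ring

theorem pvExpandA_get (cs : List Char) (i : Nat) :
    (pvExpandA cs)[i]? =
      (cs[i / 2]?).map (fun c => pvToChar ((pvBit c).xor (decide (i % 2 = 1)))) := by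
  induction cs generalizing i with
  | nil => simp [pvExpandA]
  | cons c cs ih =>
    have hcons : pvExpandA (c :: cs) = (if c = '1' then ['1', '0'] else ['0', '1']) ++ pvExpandA cs := by
      unfold pvExpandA
      rw [List.flatMap_cons]
    rw [hcons]
    match i with
    | 0 => by_cases h : c = '1' <;> simp [h, pvBit, pvToChar]
    | 1 => by_cases h : c = '1' <;> simp [h, pvBit, pvToChar]
    | (j + 2) =>
      have h2 : (if c = '1' then ['1', '0'] else ['0', '1']).length = 2 := by
        by_cases h : c = '1' <;> simp [h]
      rw [List.getElem?_append_right (by omega), h2, ih]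
      have hj : (j + 2) / 2 = j / 2 + 1 := by omega
      have hm : (j + 2) % 2 = j % 2 := by omega
      simp [hj, hm]

-- parity recursion peeling the HIGH bit instead of the low one
theorem pvPar_succ_high (k i : Nat) :
    pvPar (k + 1) i = (pvPar k i).xor (decide (i / 2 ^ k % 2 = 1)) := by
  induction k generalizing i with
  | zero => simp [pvPar]
  | succ k ih =>
    show (decide (i % 2 = 1)).xor (pvPar (k + 1) (i / 2)) = _
    rw [ih]
    have h : i / 2 / 2 ^ k = i / 2 ^ (k + 1) := by
      rw [Nat.div_div_eq_div_mul, pow_succ, mul_comm]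
    rw [h]
    show _ = ((decide (i % 2 = 1)).xor (pvPar k (i / 2))).xor _
    rw [Bool.xor_assoc]

theorem pvPar_mod (k i : Nat) : pvPar k (i % 2 ^ k) = pvPar k i := by
  induction k generalizing i with
  | zero => rfl
  | succ k ih =>
    show (decide (i % 2 ^ (k + 1) % 2 = 1)).xor (pvPar k (i % 2 ^ (k + 1) / 2)) = _
    have h1 : i % 2 ^ (k + 1) % 2 = i % 2 :=
      Nat.mod_mod_of_dvd i (dvd_pow_self 2 (Nat.succ_ne_zero k))
    have h2 : i % 2 ^ (k + 1) / 2 = i / 2 % 2 ^ k := by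
      rw [pow_succ, mul_comm]
      exact Nat.mod_mul_right_div_self i 2 (2 ^ k)
    rw [h1, h2, ih]
    rfl

theorem pvIter_get (k : Nat) (cs : List Char) (i : Nat) :
    (pvExpandA^[k + 1] cs)[i]? =
      (cs[i / 2 ^ (k + 1)]?).map (fun c => pvToChar ((pvBit c).xor (pvPar (k + 1) i))) := by
  induction k generalizing cs i with
  | zero =>
    rw [Function.iterate_one, pvExpandA_get]
    simp [pvPar]
  | succ k ih =>
    rw [Function.iterate_succ_apply, ih, pvExpandA_get, Option.map_map]
    have hdiv : i / 2 ^ (k + 1) / 2 = i / 2 ^ (k + 2) := by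
      rw [Nat.div_div_eq_div_mul, ← pow_succ]
    rw [hdiv]
    apply Option.map_congr
    intro c _
    simp only [Function.comp, pvBit_toChar]
    rw [pvPar_succ_high (k + 1) i, Bool.xor_assoc,
      Bool.xor_comm (decide (i / 2 ^ (k + 1) % 2 = 1))]

-- pyGet? with an in-range (possibly negative) index, as a Nat getElem?
theorem pvPyGet_norm {α : Type} (xs : List α) (i : Int)
    (h1 : -(xs.length : Int) ≤ i) (_h2 : i < (xs.length : Int)) :
    PySem.List.pyGet? xs i = xs[(if 0 ≤ i then i else i + xs.length).toNat]? := by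
  by_cases h : 0 ≤ i
  · rw [if_pos h]
    exact PySem.List.pyGet?_of_nonneg xs h
  · have hk : i = -(((-i).toNat : Nat) : Int) := by omega
    have h0 : 0 < (-i).toNat := by omega
    have hle : (-i).toNat ≤ xs.length := by omega
    rw [if_neg h]
    conv_lhs => rw [hk]
    rw [PySem.List.pyGet?_neg_natCast xs (-i).toNat h0 hle]
    congr 1
    omega

-- B's parity loop computes pvPar
theorem pvParLoop (k : Nat) (b : Bool) (m : Nat) :
    ((fun (p : Bool × Int) =>
        (p.1 != decide (PySem.Int.mod p.2 2 = 1), PySem.Int.floordiv p.2 2))^[k]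
      (b, (m : Int))).1 = b.xor (pvPar k m) := by
  induction k generalizing b m with
  | zero => simp [pvPar]
  | succ k ih =>
    rw [Function.iterate_succ_apply]
    have hmod : PySem.Int.mod (m : Int) 2 = ((m % 2 : Nat) : Int) := by
      exact_mod_cast PySem.Int.mod_natCast m 2
    have hdiv : PySem.Int.floordiv (m : Int) 2 = ((m / 2 : Nat) : Int) := by
      exact_mod_cast PySem.Int.floordiv_natCast m 2
    simp only [hmod, hdiv]
    rw [ih]
    have hdec : decide (((m % 2 : Nat) : Int) = 1) = decide (m % 2 = 1) := by
      norm_cast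
    rw [hdec]
    show (b.xor (decide (m % 2 = 1))).xor (pvPar k (m / 2)) = b.xor (pvPar (k + 1) m)
    rw [Bool.xor_assoc]
    rfl

-- ===== VERDICT (by name: the statement is the Claim_ definition above) =====
theorem nthchar_spec : Claim_equal_nthchar := by
  intro s r n _hDom hPre
  unfold Spec_nthchar nthchar nthchar_alt
  obtain ⟨h1, h2⟩ := hPre
  by_cases hr : r ≤ 0
  · have hnil : PySem.List.pyRange 0 r 1 = [] := PySem.List.pyRange_one_eq_nil (by omega)
    simp [hnil, hr]
  · replace hr : 0 < r := by omega
    rw [if_neg (by omega : ¬ r ≤ 0)]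
    obtain ⟨k, hkr⟩ : ∃ k : Nat, r.toNat = k + 1 := ⟨r.toNat - 1, by omega⟩
    have hLpos : (0 : Int) < (s.toList.length : Int) * 2 ^ r.toNat := by linarith
    -- the normalized index
    have hidx0 : 0 ≤ pvIdxB s r n := by
      unfold pvIdxB; split_ifs with h <;> linarith
    have hidxL : pvIdxB s r n < (s.toList.length : Int) * 2 ^ r.toNat := by
      unfold pvIdxB; split_ifs with h <;> linarith
    set N : Nat := (pvIdxB s r n).toNat with hN
    have hNcast : (N : Int) = pvIdxB s r n := Int.toNat_of_nonneg hidx0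
    have hcast2 : ((2 : Int) ^ r.toNat) = ((2 ^ r.toNat : Nat) : Int) := by push_cast; ring
    have hNlt : N < s.toList.length * 2 ^ r.toNat := by
      have h := hidxL
      rw [← hNcast, hcast2] at h
      exact_mod_cast h
    -- A side
    have hlenR : (PySem.List.pyRange 0 r 1).length = r.toNat := by
      rw [PySem.List.length_pyRange_one]; norm_num
    rw [pvFoldl_iter, hlenR]
    have hcsLen : (pvExpandA^[r.toNat] s.toList).length = s.toList.length * 2 ^ r.toNat :=
      pvIter_length r.toNat s.toList
    have hcsLenI : ((pvExpandA^[r.toNat] s.toList).length : Int)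
        = (s.toList.length : Int) * 2 ^ r.toNat := by rw [hcsLen]; push_cast; ring
    rw [pvPyGet_norm _ n (by rw [hcsLenI]; exact h1) (by rw [hcsLenI]; exact h2)]
    have hifN : (if 0 ≤ n then n else n + ((pvExpandA^[r.toNat] s.toList).length : Int)).toNat = N := by
      rw [hcsLenI, hN]
      unfold pvIdxB
      rfl
    rw [hifN, hkr, pvIter_get k s.toList N, ← hkr]
    -- the block character
    have hblk : N / 2 ^ r.toNat < s.toList.length :=
      (Nat.div_lt_iff_lt_mul (Nat.two_pow_pos r.toNat)).mpr hNlt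
    rw [List.getElem?_eq_getElem hblk]
    -- B side: blk and off as Nats
    have hblkB : PySem.Int.floordiv (pvIdxB s r n) (2 ^ r.toNat) = ((N / 2 ^ r.toNat : Nat) : Int) := by
      rw [← hNcast, hcast2]
      exact_mod_cast PySem.Int.floordiv_natCast N (2 ^ r.toNat)
    have hoffB : PySem.Int.mod (pvIdxB s r n) (2 ^ r.toNat) = ((N % 2 ^ r.toNat : Nat) : Int) := by
      rw [← hNcast, hcast2]
      exact_mod_cast PySem.Int.mod_natCast N (2 ^ r.toNat)
    rw [hblkB, hoffB]
    have hparB : pvParB r ((N % 2 ^ r.toNat : Nat) : Int) = pvPar r.toNat N := by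
      unfold pvParB
      rw [pvFoldl_iter, hlenR, pvParLoop r.toNat false (N % 2 ^ r.toNat), Bool.false_xor,
        pvPar_mod]
    rw [hparB]
    have hgetB : PySem.List.pyGet? s.toList ((N / 2 ^ r.toNat : Nat) : Int)
        = some (s.toList[N / 2 ^ r.toNat]'hblk) := by
      rw [PySem.List.pyGet?_natCast, List.getElem?_eq_getElem hblk]
    rw [hgetB]
    simp only [Option.some.injEq, Option.map_some]
    -- finish by cases on the two bits
    have hv : decide (s.toList[N / 2 ^ r.toNat]'hblk = '1') = pvBit (s.toList[N / 2 ^ r.toNat]'hblk) := rfl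
    rw [hv]
    cases hb : pvBit (s.toList[N / 2 ^ r.toNat]'hblk) <;>
      cases hp : pvPar r.toNat N <;> simp [pvToChar]
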